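-- pv_equiv track=rewrite | github.com/rush86999/atom | backend/ai/workflow_troubleshooting/diagnostic_analyzer.py | _extract_error_patterns
-- ===== SOURCE A (Python) =====
-- from typing import Any, Dict, List, Optional, Tuple
--
-- def _extract_error_patterns(error_logs: List[str]) -> Dict[str, int]:
--     """Extract and count error patterns from logs"""
--     patterns = {}
--
--     for log in error_logs:
--         # Extract error type (simplified pattern matching)
--         if "timeout" in log.lower():
--             patterns["timeout_errors"] = patterns.get("timeout_errors", 0) + 1
--         elif "connection" in log.lower() and "failed" in log.lower():
--             patterns["connection_errors"] = patterns.get("connection_errors", 0) + 1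
--         elif "authentication" in log.lower():
--             patterns["authentication_errors"] = (
--                 patterns.get("authentication_errors", 0) + 1
--             )
--         elif "permission" in log.lower():
--             patterns["permission_errors"] = patterns.get("permission_errors", 0) + 1
--         elif "validation" in log.lower():
--             patterns["validation_errors"] = patterns.get("validation_errors", 0) + 1
--         elif "not found" in log.lower():
--             patterns["not_found_errors"] = patterns.get("not_found_errors", 0) + 1
--         else:
--             patterns["other_errors"] = patterns.get("other_errors", 0) + 1
--
--     return patterns
-- ===== SOURCE B (Python) =====
-- from typing import Dict, List
--
-- # Category labels, indexed by priority bit; bit 6 ("other") is always set as fallback.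
-- _LABELS = [
--     "timeout_errors",
--     "connection_errors",
--     "authentication_errors",
--     "permission_errors",
--     "validation_errors",
--     "not_found_errors",
--     "other_errors",
-- ]
--
-- def _label(log: str) -> str:
--     # Encode all keyword hits as a bitmask; the lowest set bit is the winning priority.
--     s = log.lower()
--     mask = 64  # "other" fallback bit
--     mask |= ("timeout" in s) << 0
--     mask |= ("connection" in s and "failed" in s) << 1
--     mask |= ("authentication" in s) << 2
--     mask |= ("permission" in s) << 3
--     mask |= ("validation" in s) << 4
--     mask |= ("not found" in s) << 5
--     lsb = mask ^ (mask & (mask - 1))  # isolate lowest set bit (mask > 0)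
--     return _LABELS[lsb.bit_length() - 1]
--
-- def _extract_error_patterns(error_logs: List[str]) -> Dict[str, int]:
--     """Extract and count error patterns from logs"""
--     labels = [_label(log) for log in error_logs]
--     order = list(dict.fromkeys(labels))  # first-occurrence order
--     return {lab: labels.count(lab) for lab in order}
-- ===== Notes on version B (the rewrite author's own statement) =====
-- stated objective: alternative
-- what changed: Classification becomes bit arithmetic (keyword hits packed into a priority bitmask, label picked by isolating the lowest set bit) instead of an if-elif cascade, and counting becomes staged passes (label list, ordered dedup via dict.fromkeys, then list.count per distinct label) instead of a running dict accumulator.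
import Mathlib
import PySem

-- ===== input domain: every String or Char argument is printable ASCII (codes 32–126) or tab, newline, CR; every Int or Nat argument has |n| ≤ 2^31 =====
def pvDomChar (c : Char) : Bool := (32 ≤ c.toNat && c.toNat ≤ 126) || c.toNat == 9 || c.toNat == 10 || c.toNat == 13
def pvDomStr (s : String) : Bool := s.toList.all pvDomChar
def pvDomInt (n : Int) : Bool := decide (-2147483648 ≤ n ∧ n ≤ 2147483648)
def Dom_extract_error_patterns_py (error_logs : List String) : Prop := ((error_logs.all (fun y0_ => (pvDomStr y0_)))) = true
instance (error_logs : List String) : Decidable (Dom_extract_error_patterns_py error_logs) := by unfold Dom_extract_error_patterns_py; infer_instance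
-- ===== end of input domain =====

-- B replaces A's if-elif cascade with bit arithmetic (keyword hits packed into a priority bitmask,
-- label = lowest set bit) and the running dict accumulator with staged passes
-- (label list -> ordered dedup -> count per distinct label); objective: alternative.


-- ===== PORT A =====
-- literal transliteration of A's if-elif cascade over a dict accumulator
def pvStepA (patterns : PySem.Dict String Int) (log : String) : PySem.Dict String Int :=
  if PySem.Str.isIn "timeout" (PySem.Str.lower log) then
    patterns.insert "timeout_errors" (patterns.getD "timeout_errors" 0 + 1)
  else if PySem.Str.isIn "connection" (PySem.Str.lower log) &&
          PySem.Str.isIn "failed" (PySem.Str.lower log) then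
    patterns.insert "connection_errors" (patterns.getD "connection_errors" 0 + 1)
  else if PySem.Str.isIn "authentication" (PySem.Str.lower log) then
    patterns.insert "authentication_errors" (patterns.getD "authentication_errors" 0 + 1)
  else if PySem.Str.isIn "permission" (PySem.Str.lower log) then
    patterns.insert "permission_errors" (patterns.getD "permission_errors" 0 + 1)
  else if PySem.Str.isIn "validation" (PySem.Str.lower log) then
    patterns.insert "validation_errors" (patterns.getD "validation_errors" 0 + 1)
  else if PySem.Str.isIn "not found" (PySem.Str.lower log) then
    patterns.insert "not_found_errors" (patterns.getD "not_found_errors" 0 + 1)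
  else
    patterns.insert "other_errors" (patterns.getD "other_errors" 0 + 1)

def extract_error_patterns_py (error_logs : List String) : List (String × Int) :=
  (error_logs.foldl pvStepA PySem.Dict.empty).items

-- ===== PORT B =====
def pvLabels : List String :=
  [ "timeout_errors", "connection_errors", "authentication_errors",
    "permission_errors", "validation_errors", "not_found_errors", "other_errors" ]

-- Source B's _label: keyword hits packed into a bitmask (bit 6 always set), label = lowest set bit.
-- All mask values are positive Nats, so Python's nonnegative int ops are exact here;
-- lsb is a power of two in [1, 64], so bit_length()-1 ∈ [0,6] and _LABELS[idx] never raises.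
def pvLabel (log : String) : String :=
  let s := PySem.Str.lower log
  let mask : Nat := 64
  let mask := mask ||| ((if PySem.Str.isIn "timeout" s then 1 else 0) <<< 0)
  let mask := mask ||| ((if PySem.Str.isIn "connection" s && PySem.Str.isIn "failed" s then 1 else 0) <<< 1)
  let mask := mask ||| ((if PySem.Str.isIn "authentication" s then 1 else 0) <<< 2)
  let mask := mask ||| ((if PySem.Str.isIn "permission" s then 1 else 0) <<< 3)
  let mask := mask ||| ((if PySem.Str.isIn "validation" s then 1 else 0) <<< 4)
  let mask := mask ||| ((if PySem.Str.isIn "not found" s then 1 else 0) <<< 5)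
  let lsb := mask ^^^ (mask &&& (mask - 1))
  pvLabels.getD (PySem.Int.bitLength (lsb : Int) - 1) ""

def extract_error_patterns_py_alt (error_logs : List String) : List (String × Int) :=
  let labels := error_logs.map pvLabel
  let order := PySem.List.dedup labels
  order.map (fun lab => (lab, (labels.count lab : Int)))

-- ===== PRECONDITION & SPEC =====
def Spec_extract_error_patterns_py (error_logs : List String) (out : List (String × Int)) : Prop := out = extract_error_patterns_py_alt error_logs
instance (error_logs : List String) (out : List (String × Int)) : Decidable (Spec_extract_error_patterns_py error_logs out) := by unfold Spec_extract_error_patterns_py; infer_instance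

-- ===== CLAIM (what is proved, stated in full; the proofs are below) =====
def Claim_equal_extract_error_patterns_py : Prop := ∀ (error_logs : List String), Dom_extract_error_patterns_py error_logs → Spec_extract_error_patterns_py error_logs (extract_error_patterns_py error_logs)

-- ===== LEMMAS AND PROOFS =====
theorem pvStep_eq (patterns : PySem.Dict String Int) (log : String) :
    pvStepA patterns log =
      patterns.insert (pvLabel log) (patterns.getD (pvLabel log) 0 + 1) := by
  cases h1 : PySem.Str.isIn "timeout" (PySem.Str.lower log) <;>
  cases h2 : PySem.Str.isIn "connection" (PySem.Str.lower log) <;>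
  cases h3 : PySem.Str.isIn "failed" (PySem.Str.lower log) <;>
  cases h4 : PySem.Str.isIn "authentication" (PySem.Str.lower log) <;>
  cases h5 : PySem.Str.isIn "permission" (PySem.Str.lower log) <;>
  cases h6 : PySem.Str.isIn "validation" (PySem.Str.lower log) <;>
  cases h7 : PySem.Str.isIn "not found" (PySem.Str.lower log) <;>
  simp only [pvStepA, pvLabel, pvLabels, h1, h2, h3, h4, h5, h6, h7,
    Bool.true_and, Bool.false_and, reduceIte] <;> rfl

theorem pvFold_eq_counter (logs : List String) :
    logs.foldl pvStepA PySem.Dict.empty = PySem.Dict.counter (logs.map pvLabel) := by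
  rw [← PySem.Dict.foldl_insert_getD_add_one_eq_counter, List.foldl_map]
  have h : pvStepA = fun d x => PySem.Dict.insert d (pvLabel x) (d.getD (pvLabel x) 0 + 1) :=
    funext fun d => funext fun x => pvStep_eq d x
  rw [h]

-- ===== VERDICT (by name: the statement is the Claim_ definition above) =====
theorem extract_error_patterns_py_spec : Claim_equal_extract_error_patterns_py := by
  intro logs _
  unfold Spec_extract_error_patterns_py extract_error_patterns_py extract_error_patterns_py_alt
  rw [pvFold_eq_counter, PySem.Dict.items_counter]
  simp [PySem.List.dedup_eq_ofList]
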